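-- pv_equiv track=rewrite | github.com/Dynamite1847/ChatBot | backend/tokens.py | trim_messages_by_rounds
-- ===== SOURCE A (Python) =====
-- from typing import List
--
-- def trim_messages_by_rounds(messages: List[dict], max_rounds: int) -> List[dict]:
--     """Keep the last N rounds (user+assistant pairs) but always keep system."""
--     system_msgs = [m for m in messages if m.get("role") == "system"]
--     non_system = [m for m in messages if m.get("role") != "system"]
--
--     # Group into pairs
--     pairs = []
--     i = 0
--     while i < len(non_system):
--         if non_system[i].get("role") == "user":
--             pair = [non_system[i]]
--             if i + 1 < len(non_system) and non_system[i + 1].get("role") == "assistant":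
--                 pair.append(non_system[i + 1])
--                 i += 2
--             else:
--                 i += 1
--             pairs.append(pair)
--         else:
--             i += 1
--
--     kept_pairs = pairs[-max_rounds:] if len(pairs) > max_rounds else pairs
--     kept_msgs = []
--     for pair in kept_pairs:
--         kept_msgs.extend(pair)
--
--     return system_msgs + kept_msgs
-- ===== SOURCE B (Python) =====
-- from typing import List
--
-- def trim_messages_by_rounds(messages: List[dict], max_rounds: int) -> List[dict]:
--     """Keep the last N rounds (user+assistant pairs) but always keep system."""
--     system_msgs = [m for m in messages if m.get("role") == "system"]
--     non_system = [m for m in messages if m.get("role") != "system"]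
--
--     # Index-table decomposition: every pair starts at a user message.
--     user_idx = [i for i, m in enumerate(non_system) if m.get("role") == "user"]
--     pairs = [
--         non_system[i:i + 2]
--         if i + 1 < len(non_system) and non_system[i + 1].get("role") == "assistant"
--         else non_system[i:i + 1]
--         for i in user_idx
--     ]
--
--     kept_pairs = pairs[-max_rounds:] if len(pairs) > max_rounds else pairs
--     return system_msgs + [m for pair in kept_pairs for m in pair]
-- ===== Notes on version B (the rewrite author's own statement) =====
-- stated objective: alternative
-- what changed: Replaces A's stateful while-loop pointer machine that groups non-system messages into pairs with an index-table decomposition: collect all user-message indices via enumerate, build each pair by slicing from its index (appending the follower only when it is an assistant), keep the same [-max_rounds:] slice, and flatten with a comprehension.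
import Mathlib
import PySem

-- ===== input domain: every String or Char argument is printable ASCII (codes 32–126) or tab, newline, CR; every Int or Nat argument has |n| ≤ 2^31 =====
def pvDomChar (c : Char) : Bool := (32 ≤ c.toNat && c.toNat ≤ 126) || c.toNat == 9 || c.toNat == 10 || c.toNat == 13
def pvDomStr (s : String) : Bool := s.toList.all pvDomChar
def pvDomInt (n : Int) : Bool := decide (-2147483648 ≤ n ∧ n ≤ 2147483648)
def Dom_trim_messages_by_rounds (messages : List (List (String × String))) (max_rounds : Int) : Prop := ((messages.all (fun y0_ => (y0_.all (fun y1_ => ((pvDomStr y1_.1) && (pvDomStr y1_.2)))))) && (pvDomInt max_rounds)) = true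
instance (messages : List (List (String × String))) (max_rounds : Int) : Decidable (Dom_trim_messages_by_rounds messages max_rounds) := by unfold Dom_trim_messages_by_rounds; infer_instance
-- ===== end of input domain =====

-- B replaces A's while-loop pointer machine over non-system messages by an
-- index-table decomposition (enumerate user indices, slice each pair out);
-- objective: alternative (same cost, different structure).

-- m.get("role") on the association-list encoding of a dict: first match.
def pvRole (m : List (String × String)) : Option String :=
  (m.find? (fun p => p.1 == "role")).map (·.2)

-- ===== PORT A =====
-- A's while-loop over index i, transliterated as structural recursion on the
-- suffix of non_system starting at i (same state, same branch order).
def pvPairsA : List (List (String × String)) → List (List (List (String × String)))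
  | [] => []
  | m :: rest =>
    if pvRole m = some "user" then
      match rest with
      | m2 :: rest2 =>
        if pvRole m2 = some "assistant" then
          [m, m2] :: pvPairsA rest2          -- pair.append(non_system[i+1]); i += 2
        else
          [m] :: pvPairsA (m2 :: rest2)      -- i += 1
      | [] => [[m]]                          -- i += 1 past the end
    else
      pvPairsA rest                          -- i += 1
termination_by l => l.length
decreasing_by all_goals simp

def trim_messages_by_rounds (messages : List (List (String × String))) (max_rounds : Int) : List (List (String × String)) :=
  let system_msgs := messages.filter (fun m => pvRole m == some "system")
  let non_system := messages.filter (fun m => !(pvRole m == some "system"))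
  let pairs := pvPairsA non_system
  let kept_pairs := if (pairs.length : Int) > max_rounds then PySem.List.slice pairs (some (-max_rounds)) none else pairs
  system_msgs ++ kept_pairs.foldl (fun acc pair => acc ++ pair) []

-- ===== PORT B =====
-- one pair, built from the index where its user message sits
def pvPairB (ns : List (List (String × String))) (i : Int) : List (List (String × String)) :=
  if i + 1 < (ns.length : Int) ∧ pvRole (PySem.List.pyGetD ns (i + 1) []) = some "assistant" then
    PySem.List.slice ns (some i) (some (i + 2))
  else
    PySem.List.slice ns (some i) (some (i + 1))

def trim_messages_by_rounds_alt (messages : List (List (String × String))) (max_rounds : Int) : List (List (String × String)) :=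
  let system_msgs := messages.filter (fun m => pvRole m == some "system")
  let non_system := messages.filter (fun m => !(pvRole m == some "system"))
  let user_idx := ((PySem.List.enumerate non_system 0).filter (fun p => pvRole p.2 == some "user")).map (·.1)
  let pairs := user_idx.map (pvPairB non_system)
  let kept_pairs := if (pairs.length : Int) > max_rounds then PySem.List.slice pairs (some (-max_rounds)) none else pairs
  system_msgs ++ kept_pairs.flatMap (fun pair => pair)

-- ===== PRECONDITION & SPEC =====
def Spec_trim_messages_by_rounds (messages : List (List (String × String))) (max_rounds : Int) (out : List (List (String × String))) : Prop := out = trim_messages_by_rounds_alt messages max_rounds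
instance (messages : List (List (String × String))) (max_rounds : Int) (out : List (List (String × String))) : Decidable (Spec_trim_messages_by_rounds messages max_rounds out) := by unfold Spec_trim_messages_by_rounds; infer_instance

-- ===== CLAIM (what is proved, stated in full; the proofs are below) =====
def Claim_equal_trim_messages_by_rounds : Prop := ∀ (messages : List (List (String × String))) (max_rounds : Int), Dom_trim_messages_by_rounds messages max_rounds → Spec_trim_messages_by_rounds messages max_rounds (trim_messages_by_rounds messages max_rounds)

-- ===== LEMMAS AND PROOFS =====

-- ns[k] for k = |pre|: the element just after the prefix
theorem pv_pyGetD_mid {a : Type} (pre l : List a) (x d : a) :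
    PySem.List.pyGetD (pre ++ x :: l) ((pre.length : Nat) : Int) d = x := by
  rw [PySem.List.pyGetD_natCast]
  simp [List.getD_eq_getElem?_getD]

-- ns[|pre| : |pre|+n] = first n elements after the prefix
theorem pv_slice_mid {a : Type} (pre l : List a) (n : Nat) :
    PySem.List.slice (pre ++ l) (some ((pre.length : Nat) : Int))
      (some (((pre.length : Nat) : Int) + ((n : Nat) : Int))) = l.take n := by
  rw [PySem.List.slice_natCast_add]
  simp

-- A's pair grouping equals B's index-table construction, generalized over a
-- consumed prefix `pre` (the part of non_system left of the current pointer).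
theorem pvPairsA_eq_map (l pre : List (List (String × String))) :
    pvPairsA l =
      ((PySem.List.enumerate l (pre.length : Int)).filter
          (fun p => pvRole p.2 == some "user")).map (fun p => pvPairB (pre ++ l) p.1) := by
  induction l using pvPairsA.induct generalizing pre with
  | case1 => simp [pvPairsA, PySem.List.enumerate_nil]
  | case2 m hu m2 rest2 ha ih =>
    -- user followed by assistant
    have ih' := ih (pre ++ [m, m2])
    simp only [List.append_assoc, List.cons_append, List.nil_append,
      List.length_append, List.length_cons, List.length_nil, Nat.cast_add,
      Nat.cast_one, Nat.cast_zero] at ih'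
    have hg : PySem.List.pyGetD (pre ++ m :: m2 :: rest2) ((pre.length : Int) + 1) [] = m2 := by
      have h := pv_pyGetD_mid (pre ++ [m]) rest2 m2 ([] : List (String × String))
      simp only [List.append_assoc, List.singleton_append, List.length_append,
        List.length_singleton, Nat.cast_add, Nat.cast_one] at h
      exact h
    have hhead : pvPairB (pre ++ m :: m2 :: rest2) ((pre.length : Nat) : Int) = [m, m2] := by
      unfold pvPairB
      rw [if_pos ⟨by push_cast [List.length_append, List.length_cons]; omega, by rw [hg]; exact ha⟩]
      have h := pv_slice_mid pre (m :: m2 :: rest2) 2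
      simpa using h
    rw [PySem.List.enumerate_cons, PySem.List.enumerate_cons, pvPairsA.eq_def]
    norm_num at ih'
    simp [hu, ha, hhead]
    rw [show (pre.length : Int) + 1 + 1 = (pre.length : Int) + 2 by ring]
    exact ih'
  | case3 m hu m2 rest2 ha ih =>
    -- user followed by non-assistant
    have ih' := ih (pre ++ [m])
    simp only [List.append_assoc, List.singleton_append, List.length_append,
      List.length_singleton, Nat.cast_add, Nat.cast_one] at ih'
    have hg : PySem.List.pyGetD (pre ++ m :: m2 :: rest2) ((pre.length : Int) + 1) [] = m2 := by
      have h := pv_pyGetD_mid (pre ++ [m]) rest2 m2 ([] : List (String × String))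
      simp only [List.append_assoc, List.singleton_append, List.length_append,
        List.length_singleton, Nat.cast_add, Nat.cast_one] at h
      exact h
    have hhead : pvPairB (pre ++ m :: m2 :: rest2) ((pre.length : Nat) : Int) = [m] := by
      unfold pvPairB
      rw [if_neg (by rw [hg]; exact fun hc => ha hc.2)]
      have h := pv_slice_mid pre (m :: m2 :: rest2) 1
      simpa using h
    rw [PySem.List.enumerate_cons, pvPairsA.eq_def]
    simp [hu, ha, hhead, ih']
  | case4 m hu =>
    -- user, nothing after it
    rw [PySem.List.enumerate_cons, PySem.List.enumerate_nil]
    simp [pvPairsA, hu, pvPairB]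
    rw [show ((pre.length : Int) + 1) = ((pre.length : Int) + ((1 : Nat) : Int)) by norm_num]
    rw [PySem.List.slice_natCast_add]
    simp
  | case5 m rest hu ih =>
    -- non-user head
    have ih' := ih (pre ++ [m])
    simp only [List.append_assoc, List.singleton_append, List.length_append,
      List.length_singleton, Nat.cast_add, Nat.cast_one] at ih'
    rw [PySem.List.enumerate_cons, pvPairsA.eq_def]
    simpa [hu] using ih'

theorem trim_messages_by_rounds_spec : Claim_equal_trim_messages_by_rounds := by
  intro messages max_rounds _
  unfold Spec_trim_messages_by_rounds trim_messages_by_rounds trim_messages_by_rounds_alt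
  simp only []
  rw [pvPairsA_eq_map (messages.filter (fun m => !(pvRole m == some "system"))) []]
  simp [PySem.List.foldl_append_eq_flatten, List.map_map]
  rfl
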